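-- pv_equiv track=rewrite | github.com/ilchemla/worldcup2018-bets | utils/Games.py | get_match_weight
-- ===== SOURCE A (Python) =====
-- def get_match_weight(match_id):
--     weight_per_round = [1, 1, 1, 2, 4, 8, 0, 16]
--     match_ids = [
--         range(0, 16),
--         range(16, 32),
--         range(32, 48),
--         range(48, 56),
--         range(56, 60),
--         range(60, 62),
--         [62],
--         [63]
--     ]
--
--     for day, ids in enumerate(match_ids):
--         if match_id in ids:
--             return weight_per_round[day]
--
--     return 0
-- ===== SOURCE B (Python) =====
-- import bisect
--
-- _BOUNDS = [16, 32, 48, 56, 60, 62, 63, 64]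
-- _WEIGHTS = [1, 1, 1, 2, 4, 8, 0, 16]
--
-- def get_match_weight(match_id):
--     if match_id < 0 or match_id >= 64:
--         return 0
--     return _WEIGHTS[bisect.bisect_right(_BOUNDS, match_id)]
-- ===== Notes on version B (the rewrite author's own statement) =====
-- stated objective: alternative
-- what changed: Replaced the linear scan over a list of range buckets with a range guard plus binary search (bisect_right) over a precomputed sorted boundary table indexing a parallel weight table.
import Mathlib
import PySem

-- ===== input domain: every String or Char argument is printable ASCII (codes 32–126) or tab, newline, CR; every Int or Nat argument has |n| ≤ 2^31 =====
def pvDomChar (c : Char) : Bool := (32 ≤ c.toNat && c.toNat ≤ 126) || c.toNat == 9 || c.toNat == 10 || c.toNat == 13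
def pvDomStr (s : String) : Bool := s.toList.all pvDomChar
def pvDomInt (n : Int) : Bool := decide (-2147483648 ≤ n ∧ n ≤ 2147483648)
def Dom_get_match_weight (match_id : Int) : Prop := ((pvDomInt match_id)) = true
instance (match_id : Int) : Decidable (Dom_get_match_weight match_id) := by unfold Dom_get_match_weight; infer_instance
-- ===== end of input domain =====

-- B replaces A's linear scan over range buckets with a binary search over a sorted boundary table (alternative structure, same exact values).

-- ===== PORT A =====
-- A's loop: for day, ids in enumerate(match_ids): if match_id in ids: return weight_per_round[day].
-- Each bucket's Python membership test ('m in range(a,b)' = a ≤ m < b; 'm in [c]' = m == c) is ported as its Boolean test.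
def pvA_loop (match_id : Int) : List (Int → Bool) → List Int → Int
  | ids :: restIds, w :: restW => if ids match_id then w else pvA_loop match_id restIds restW
  | _, _ => 0

def get_match_weight (match_id : Int) : Int :=
  let weight_per_round : List Int := [1, 1, 1, 2, 4, 8, 0, 16]
  let match_ids : List (Int → Bool) :=
    [ fun m => decide (0 ≤ m) && decide (m < 16)
    , fun m => decide (16 ≤ m) && decide (m < 32)
    , fun m => decide (32 ≤ m) && decide (m < 48)
    , fun m => decide (48 ≤ m) && decide (m < 56)
    , fun m => decide (56 ≤ m) && decide (m < 60)
    , fun m => decide (60 ≤ m) && decide (m < 62)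
    , fun m => m == 62
    , fun m => m == 63 ]
  pvA_loop match_id match_ids weight_per_round

-- ===== PORT B =====
-- bisect.bisect_right ported as the standard binary search on (lo, hi); the fuel
-- (xs.length suffices, since hi - lo shrinks each step) only makes recursion structural.
def pvBisectGo (xs : List Int) (x : Int) : Nat → Nat → Nat → Nat
  | 0, lo, _hi => lo
  | Nat.succ fuel, lo, hi =>
    if lo < hi then
      let mid := (lo + hi) / 2
      if x < xs.getD mid 0 then pvBisectGo xs x fuel lo mid
      else pvBisectGo xs x fuel (mid + 1) hi
    else lo

def pvBisectRight (xs : List Int) (x : Int) : Nat :=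
  pvBisectGo xs x xs.length 0 xs.length

def pvBounds : List Int := [16, 32, 48, 56, 60, 62, 63, 64]
def pvWeights : List Int := [1, 1, 1, 2, 4, 8, 0, 16]

def get_match_weight_alt (match_id : Int) : Int :=
  if match_id < 0 ∨ 64 ≤ match_id then 0
  else pvWeights.getD (pvBisectRight pvBounds match_id) 0

-- ===== PRECONDITION & SPEC =====
def Spec_get_match_weight (match_id : Int) (out : Int) : Prop := out = get_match_weight_alt match_id
instance (match_id : Int) (out : Int) : Decidable (Spec_get_match_weight match_id out) := by unfold Spec_get_match_weight; infer_instance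

-- ===== CLAIM (what is proved, stated in full; the proofs are below) =====
def Claim_equal_get_match_weight : Prop := ∀ (match_id : Int), Dom_get_match_weight match_id → Spec_get_match_weight match_id (get_match_weight match_id)

-- ===== LEMMAS AND PROOFS =====

-- ===== VERDICT (by name: the statement is the Claim_ definition above) =====
theorem get_match_weight_spec : Claim_equal_get_match_weight := by
  have key : ∀ n ∈ List.range 64, get_match_weight (n : Int) = get_match_weight_alt (n : Int) := by
    decide
  intro m _
  unfold Spec_get_match_weight
  by_cases h : 0 ≤ m ∧ m < 64
  · have hm : ((m.toNat : Int)) = m := by omega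
    rw [← hm]
    exact key m.toNat (List.mem_range.mpr (by omega))
  · have h1 : m < 0 ∨ 64 ≤ m := by omega
    unfold get_match_weight get_match_weight_alt
    rw [if_pos h1]
    simp only [pvA_loop]
    split_ifs <;> (try rfl) <;>
      (exfalso; simp_all only [Bool.and_eq_true, decide_eq_true_eq, beq_iff_eq]; omega)
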